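-- pv_equiv track=rewrite | github.com/pypi-data/pypi-mirror-383 | packages/dana/dana-0.6.0.1-py3-none-any.whl/dana/core/lang/lsp/analyzer.py | _get_word_at_position
-- ===== SOURCE A (Python) =====
-- def _get_word_at_position(line: str, character: int) -> str | None:
--     """Extract the word at the given character position."""
--     if character >= len(line):
--         return None
--
--     # Find word boundaries
--     start = character
--     while start > 0 and (line[start - 1].isalnum() or line[start - 1] in "_.:"):
--         start -= 1
--
--     end = character
--     while end < len(line) and (line[end].isalnum() or line[end] in "_.:"):
--         end += 1
--
--     if start < end:
--         return line[start:end]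
--     return None
-- ===== SOURCE B (Python) =====
-- def _get_word_at_position(line: str, character: int) -> str | None:
--     """Extract the word at the given character position.
--
--     Single left-to-right scan over the maximal word spans of the line: return
--     the slice of the first span whose closed interval [start, end] contains the
--     cursor.  A negative cursor selects no span, so the result is None there.
--     """
--     if character >= len(line):
--         return None
--     n = len(line)
--     i = 0
--     while i < n:
--         if line[i].isalnum() or line[i] in "_.:":
--             j = i + 1
--             while j < n and (line[j].isalnum() or line[j] in "_.:"):
--                 j += 1
--             if i <= character <= j:
--                 return line[i:j]
--             i = j + 1
--         else:
--             i += 1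
--     return None
-- ===== Notes on version B (the rewrite author's own statement) =====
-- stated objective: alternative
-- what changed: B replaces A's bidirectional expansion from the cursor by a single left-to-right scan over the maximal word spans of the line, returning the slice of the first span whose closed interval contains the cursor; a negative cursor selects no span, so B returns None there instead of A's negative-index wraparound result.
-- intended difference: For negative character positions (with -len(line) <= character < 0) where line[character] under Python's wraparound indexing is a word character, A returns a word obtained by negative-index expansion while B returns None; a cursor position is inherently non-negative, so None is the intended value. — e.g. on _get_word_at_position("ab", -1): A returns some "b", B returns none
import Mathlib
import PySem

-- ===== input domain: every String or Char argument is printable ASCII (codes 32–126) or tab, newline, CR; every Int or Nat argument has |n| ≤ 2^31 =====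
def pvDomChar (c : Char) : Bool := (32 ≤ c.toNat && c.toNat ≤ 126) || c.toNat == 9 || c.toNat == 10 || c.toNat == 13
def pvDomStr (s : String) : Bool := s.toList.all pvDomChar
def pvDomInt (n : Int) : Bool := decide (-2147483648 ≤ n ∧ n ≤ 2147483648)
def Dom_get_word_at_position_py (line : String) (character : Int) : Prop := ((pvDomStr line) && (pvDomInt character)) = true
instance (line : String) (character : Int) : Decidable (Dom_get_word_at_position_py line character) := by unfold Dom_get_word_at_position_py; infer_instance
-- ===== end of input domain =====

-- B replaces A's bidirectional expansion from the cursor by one left-to-right scan over maximal word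
-- spans (alternative decomposition, same cost); for a negative cursor B returns none where A's
-- negative-index expansion returns a word (stated in D_).

-- shared character predicate:  c.isalnum() or c in "_.:"  (membership in a 3-char string = equality tests)
def pvIsWordChar (c : Char) : Bool :=
  PySem.Chars.isalnum c || c == '_' || c == '.' || c == ':'

-- line[i] is a word character (Python indexing, negative wraps; out of range would raise: treated as false,
-- reachable only outside Pre_)
def pvWordAt (line : String) (i : Int) : Bool :=
  match PySem.Str.pyGet? line i with
  | some c => pvIsWordChar c
  | none => false

-- ===== PORT A =====
-- while start > 0 and (line[start-1].isalnum() or line[start-1] in "_.:"): start -= 1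
def pyAeLeft (line : String) (start : Int) : Int :=
  if h : 0 < start ∧ pvWordAt line (start - 1) = true then pyAeLeft line (start - 1) else start
termination_by start.toNat
decreasing_by omega

-- while end < len(line) and (line[end].isalnum() or line[end] in "_.:"): end += 1
def pyAeRight (line : String) (e : Int) : Int :=
  if h : e < PySem.Str.len line ∧ pvWordAt line e = true then pyAeRight line (e + 1) else e
termination_by (PySem.Str.len line - e).toNat
decreasing_by omega

def get_word_at_position_py (line : String) (character : Int) : Option String :=
  if character ≥ PySem.Str.len line then none
  else
    let start := pyAeLeft line character
    let e := pyAeRight line character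
    if start < e then some (PySem.Str.slice line (some start) (some e)) else none

-- ===== PORT B =====
-- j = i + 1; while j < n and word(line[j]): j += 1
def pyAltRun (line : String) (n : Nat) (j : Nat) : Nat :=
  if h : j < n ∧ pvWordAt line (j : Int) = true then pyAltRun line n (j + 1) else j
termination_by n - j
decreasing_by omega

-- the outer while loop of B: scan spans left to right from index i.  Structural recursion on a
-- fuel counter that only guards totality: fuel ≥ n - i holds at every call, and when fuel is 0
-- then i ≥ n, which is exactly the loop's exit condition.
def pyAltScan (line : String) (n : Nat) (character : Int) : Nat → Nat → Option String
  | 0, _ => none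
  | fuel + 1, i =>
    if i < n then
      if pvWordAt line (i : Int) then
        let j := pyAltRun line n (i + 1)
        if (i : Int) ≤ character ∧ character ≤ (j : Int) then
          some (PySem.Str.slice line (some (i : Int)) (some (j : Int)))
        else pyAltScan line n character fuel (j + 1)
      else pyAltScan line n character fuel (i + 1)
    else none

def get_word_at_position_py_alt (line : String) (character : Int) : Option String :=
  if character ≥ PySem.Str.len line then none
  else pyAltScan line line.length character line.length 0

-- ===== PRECONDITION & SPEC =====
-- Pre_ excludes exactly the inputs on which A raises IndexError: character < -len(line)
def Pre_get_word_at_position_py (line : String) (character : Int) : Prop :=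
  -(PySem.Str.len line) ≤ character
instance (line : String) (character : Int) : Decidable (Pre_get_word_at_position_py line character) := by
  unfold Pre_get_word_at_position_py; infer_instance

def pvWitness_get_word_at_position_py : String × Int := ("foo bar", 4)

-- For -len(line) ≤ character < 0 with line[character] (wraparound indexing) a word character, A returns a
-- word obtained by negative-index expansion while B returns none: a cursor position is inherently
-- non-negative, so none is the intended value.
def D_get_word_at_position_py (line : String) (character : Int) : Prop :=
  character < 0 ∧ pvWordAt line character = true
instance (line : String) (character : Int) : Decidable (D_get_word_at_position_py line character) := by
  unfold D_get_word_at_position_py; infer_instance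

def Spec_get_word_at_position_py (line : String) (character : Int) (out : Option String) : Prop :=
  ¬ D_get_word_at_position_py line character → out = get_word_at_position_py_alt line character
instance (line : String) (character : Int) (out : Option String) : Decidable (Spec_get_word_at_position_py line character out) := by
  unfold Spec_get_word_at_position_py; infer_instance

def pvDiffWitness_get_word_at_position_py : String × Int := ("ab", -1)
def pvDiffWitnessOut_get_word_at_position_py : (Option String) × (Option String) := (some "b", none)

-- ===== CLAIM (what is proved, stated in full; the proofs are below) =====
def Claim_unchanged_get_word_at_position_py : Prop := ∀ (line : String) (character : Int), Dom_get_word_at_position_py line character → Pre_get_word_at_position_py line character → Spec_get_word_at_position_py line character (get_word_at_position_py line character)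
def Claim_changed_get_word_at_position_py : Prop := Dom_get_word_at_position_py (pvDiffWitness_get_word_at_position_py.1) (pvDiffWitness_get_word_at_position_py.2) ∧ Pre_get_word_at_position_py (pvDiffWitness_get_word_at_position_py.1) (pvDiffWitness_get_word_at_position_py.2) ∧ D_get_word_at_position_py (pvDiffWitness_get_word_at_position_py.1) (pvDiffWitness_get_word_at_position_py.2) ∧ get_word_at_position_py (pvDiffWitness_get_word_at_position_py.1) (pvDiffWitness_get_word_at_position_py.2) = pvDiffWitnessOut_get_word_at_position_py.1 ∧ get_word_at_position_py_alt (pvDiffWitness_get_word_at_position_py.1) (pvDiffWitness_get_word_at_position_py.2) = pvDiffWitnessOut_get_word_at_position_py.2 ∧ pvDiffWitnessOut_get_word_at_position_py.1 ≠ pvDiffWitnessOut_get_word_at_position_py.2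
def Claim_exact_get_word_at_position_py : Prop := ∀ (line : String) (character : Int), Dom_get_word_at_position_py line character → Pre_get_word_at_position_py line character → D_get_word_at_position_py line character → get_word_at_position_py line character ≠ get_word_at_position_py_alt line character

-- ===== LEMMAS AND PROOFS =====

theorem pyAltRun_ge (line : String) (n j : Nat) : j ≤ pyAltRun line n j := by
  induction j using pyAltRun.induct (line := line) (n := n) with
  | case1 x h ih => rw [pyAltRun, dif_pos h]; omega
  | case2 x h => rw [pyAltRun, dif_neg h]

-- one-step unfolding of the scan at positive fuel, with the let for j expanded
theorem pyAltScan_eq (line : String) (n : Nat) (character : Int) (fuel i : Nat) :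
    pyAltScan line n character (fuel + 1) i =
      if i < n then
        if pvWordAt line (i : Int) then
          if (i : Int) ≤ character ∧ character ≤ ((pyAltRun line n (i + 1) : Nat) : Int) then
            some (PySem.Str.slice line (some (i : Int)) (some ((pyAltRun line n (i + 1) : Nat) : Int)))
          else pyAltScan line n character fuel (pyAltRun line n (i + 1) + 1)
        else pyAltScan line n character fuel (i + 1)
      else none := by
  rw [pyAltScan]

theorem pyAltRun_le (line : String) (n j : Nat) (h : j ≤ n) : pyAltRun line n j ≤ n := by
  induction j using pyAltRun.induct (line := line) (n := n) with
  | case1 x h' ih => rw [pyAltRun, dif_pos h']; exact ih h'.1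
  | case2 x h' => rw [pyAltRun, dif_neg h']; exact h

theorem pyAltRun_word (line : String) (n j : Nat) :
    ∀ k, j ≤ k → k < pyAltRun line n j → pvWordAt line (k : Int) = true := by
  induction j using pyAltRun.induct (line := line) (n := n) with
  | case1 x h ih =>
      intro k hk1 hk2
      rw [pyAltRun, dif_pos h] at hk2
      rcases Nat.eq_or_lt_of_le hk1 with rfl | hlt
      · exact h.2
      · exact ih k hlt hk2
  | case2 x h =>
      intro k hk1 hk2
      rw [pyAltRun, dif_neg h] at hk2; omega

theorem pyAltRun_stop (line : String) (n j : Nat) :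
    ¬ (pyAltRun line n j < n ∧ pvWordAt line ((pyAltRun line n j : Nat) : Int) = true) := by
  induction j using pyAltRun.induct (line := line) (n := n) with
  | case1 x h ih => rw [pyAltRun, dif_pos h]; exact ih
  | case2 x h => rw [pyAltRun, dif_neg h]; exact h

theorem pyAltRun_run (line : String) (n : Nat) :
    ∀ d m j : Nat, m ≤ j → j ≤ n → j - m ≤ d →
      (∀ k, m ≤ k → k < j → pvWordAt line (k : Int) = true) →
      ¬ (j < n ∧ pvWordAt line (j : Int) = true) → pyAltRun line n m = j := by
  intro d
  induction d with
  | zero =>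
    intro m j hmj hjn hd hword hstop
    have : m = j := by omega
    subst this
    rw [pyAltRun, dif_neg hstop]
  | succ d ih =>
    intro m j hmj hjn hd hword hstop
    rcases Nat.eq_or_lt_of_le hmj with rfl | hlt
    · rw [pyAltRun, dif_neg hstop]
    · have hm : m < n := lt_of_lt_of_le hlt hjn
      have hw : pvWordAt line (m : Int) = true := hword m le_rfl hlt
      rw [pyAltRun, dif_pos ⟨hm, hw⟩]
      exact ih (m + 1) j (by omega) hjn (by omega)
        (fun k hk1 hk2 => hword k (by omega) hk2) hstop

-- Nat-level form of A's left loop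
def pvSpecL (line : String) : Nat → Nat
  | 0 => 0
  | m + 1 => if pvWordAt line (m : Int) then pvSpecL line m else m + 1

theorem pvSpecL_run (line : String) (i : Nat) (hb : i = 0 ∨ pvWordAt line ((i : Int) - 1) = false) :
    ∀ m, i ≤ m → (∀ k, i ≤ k → k < m → pvWordAt line (k : Int) = true) → pvSpecL line m = i := by
  intro m
  induction m with
  | zero =>
    intro him _
    have h0 : i = 0 := by omega
    subst h0
    simp [pvSpecL]
  | succ m ih =>
    intro him hword
    rcases Nat.eq_or_lt_of_le him with rfl | hlt
    · rw [pvSpecL]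
      rcases hb with h0 | hf
      · omega
      · have hc : ((m + 1 : Nat) : Int) - 1 = (m : Int) := by push_cast; ring
        rw [hc] at hf
        rw [if_neg (by simp [hf])]
    · have hw : pvWordAt line (m : Int) = true := hword m (by omega) (by omega)
      rw [pvSpecL, if_pos hw]
      exact ih (by omega) (fun k hk1 hk2 => hword k hk1 (by omega))

-- bridge: A's left loop at a Nat index computes pvSpecL
theorem pyAeLeft_natCast (line : String) (m : Nat) :
    pyAeLeft line (m : Int) = ((pvSpecL line m : Nat) : Int) := by
  induction m with
  | zero => rw [pyAeLeft, dif_neg (by simp)]; simp [pvSpecL]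
  | succ m ih =>
    have hc : ((m + 1 : Nat) : Int) - 1 = (m : Int) := by push_cast; ring
    rw [pyAeLeft, pvSpecL]
    by_cases hw : pvWordAt line (m : Int) = true
    · rw [dif_pos ⟨by push_cast; omega, by rw [hc]; exact hw⟩, hc, ih, if_pos hw]
    · rw [dif_neg (by rw [hc]; tauto), if_neg hw]

theorem pyAeLeft_nonpos (line : String) (c : Int) (h : c ≤ 0) : pyAeLeft line c = c := by
  rw [pyAeLeft, dif_neg (by omega)]

-- bridge: A's right loop at a Nat index computes pyAltRun with n = line.length
theorem pyAeRight_natCast (line : String) (n : Nat) (hn : (n : Int) = PySem.Str.len line) :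
    ∀ m : Nat, pyAeRight line (m : Int) = ((pyAltRun line n m : Nat) : Int) := by
  intro m
  induction m using pyAltRun.induct (line := line) (n := n) with
  | case1 x h ih =>
    rw [pyAltRun, dif_pos h, pyAeRight, dif_pos ⟨by omega, h.2⟩]
    rw [show (x : Int) + 1 = ((x + 1 : Nat) : Int) by push_cast; ring]
    exact ih
  | case2 x h =>
    rw [pyAltRun, dif_neg h, pyAeRight, dif_neg ?_]
    intro hc
    exact h ⟨by omega, hc.2⟩

theorem pyAeRight_ge (line : String) (e : Int) : e ≤ pyAeRight line e := by
  induction e using pyAeRight.induct (line := line) with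
  | case1 x h ih => rw [pyAeRight, dif_pos h]; omega
  | case2 x h => rw [pyAeRight, dif_neg h]

-- the scan returns none once the cursor is strictly left of the scan position
theorem pyAltScan_none (line : String) (n : Nat) (character : Int) :
    ∀ fuel i : Nat, character < (i : Int) → pyAltScan line n character fuel i = none := by
  intro fuel
  induction fuel with
  | zero => intro i _; rfl
  | succ fuel ih =>
    intro i hc
    by_cases hx : i < n
    · by_cases hw : pvWordAt line (i : Int) = true
      · have hj := pyAltRun_ge line n (i + 1)
        rw [pyAltScan_eq, if_pos hx, if_pos hw, if_neg (by rintro ⟨h1, _⟩; omega)]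
        exact ih _ (by push_cast at hc ⊢; omega)
      · rw [pyAltScan_eq, if_pos hx, if_neg (by simpa using hw)]
        exact ih _ (by push_cast at hc ⊢; omega)
    · rw [pyAltScan_eq, if_neg hx]

-- main invariant: from a span-start position i ≤ c the scan computes exactly A's expansion around c
theorem pyAltScan_main (line : String) (c : Nat) (hcn : c < line.length) :
    ∀ fuel i : Nat, line.length - i ≤ fuel → i ≤ c → (i = 0 ∨ pvWordAt line ((i : Int) - 1) = false) →
      pyAltScan line line.length (c : Int) fuel i =
        (if pvSpecL line c < pyAltRun line line.length c
         then some (PySem.Str.slice line (some ((pvSpecL line c : Nat) : Int)) (some ((pyAltRun line line.length c : Nat) : Int)))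
         else none) := by
  intro fuel
  induction fuel with
  | zero =>
    intro i hfuel hic _
    omega
  | succ fuel ih =>
    intro i hfuel hic hb
    rcases Nat.eq_or_lt_of_le hic with rfl | hlt
    · by_cases hw : pvWordAt line (i : Int) = true
      · -- i = c is a word char: the scan returns span (i, run(i+1)), which contains c
        have hL : pvSpecL line i = i := pvSpecL_run line i hb i le_rfl (by omega)
        have hR : pyAltRun line line.length i = pyAltRun line line.length (i + 1) := by
          rw [pyAltRun, dif_pos ⟨hcn, hw⟩]
        have hj := pyAltRun_ge line line.length (i + 1)
        rw [pyAltScan_eq, if_pos hcn, if_pos hw,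
            if_pos ⟨le_rfl, by push_cast; omega⟩, hL, hR, if_pos (by omega)]
      · -- i = c is not a word char: the scan moves past c and returns none; A's interval is empty
        have hL : pvSpecL line i = i := by
          rcases hb with h0 | hf
          · subst h0; simp [pvSpecL]
          · cases i with
            | zero => simp [pvSpecL]
            | succ m =>
              have hc : ((m + 1 : Nat) : Int) - 1 = (m : Int) := by push_cast; ring
              rw [hc] at hf
              rw [pvSpecL, if_neg (by simp [hf])]
        have hR : pyAltRun line line.length i = i := by
          rw [pyAltRun, dif_neg (by simp [hw])]
        rw [pyAltScan_eq, if_pos hcn, if_neg (by simpa using hw),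
            pyAltScan_none line line.length (i : Int) fuel (i + 1) (by push_cast; omega),
            hL, hR, if_neg (by omega)]
    · have hin : i < line.length := by omega
      by_cases hw : pvWordAt line (i : Int) = true
      · have hge := pyAltRun_ge line line.length (i + 1)
        set j := pyAltRun line line.length (i + 1) with hj
        by_cases hcj : c ≤ j
        · -- the span (i, j) contains c: both sides are some (line[i:j])
          have hword : ∀ k, i ≤ k → k < j → pvWordAt line (k : Int) = true := by
            intro k hk1 hk2
            rcases Nat.eq_or_lt_of_le hk1 with rfl | hk1'
            · exact hw
            · exact pyAltRun_word line line.length (i + 1) k hk1' hk2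
          have hL : pvSpecL line c = i :=
            pvSpecL_run line i hb c (by omega) (fun k hk1 hk2 => hword k hk1 (by omega))
          have hstop := pyAltRun_stop line line.length (i + 1)
          rw [← hj] at hstop
          have hR : pyAltRun line line.length c = j :=
            pyAltRun_run line line.length (j - c) c j (by omega)
              (pyAltRun_le line line.length (i + 1) (by omega)) (by omega)
              (fun k hk1 hk2 => hword k (by omega) hk2) hstop
          rw [pyAltScan_eq, if_pos hin, if_pos hw, ← hj,
              if_pos ⟨by push_cast; omega, by push_cast; omega⟩, hL, hR, if_pos (by omega)]
        · -- span ends before c: the char at j is not a word char, continue from j + 1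
          rw [Nat.not_le] at hcj
          have hstop := pyAltRun_stop line line.length (i + 1)
          rw [← hj] at hstop
          have hwj : pvWordAt line (j : Int) = false := by
            by_cases h : pvWordAt line (j : Int) = true
            · exact absurd ⟨by omega, h⟩ hstop
            · simpa using h
          have hrec := ih (j + 1) (by omega) (by omega)
            (Or.inr (by rw [show ((j + 1 : Nat) : Int) - 1 = (j : Int) by push_cast; ring]; exact hwj))
          rw [pyAltScan_eq, if_pos hin, if_pos hw, ← hj,
              if_neg (by rintro ⟨_, hh⟩; push_cast at hh; omega)]
          exact hrec
      · -- not a word char at i < c: step one position right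
        have hwf : pvWordAt line (i : Int) = false := by simpa using hw
        rw [pyAltScan_eq, if_pos hin, if_neg (by simp [hwf])]
        exact ih (i + 1) (by omega) (by omega)
          (Or.inr (by rw [show ((i + 1 : Nat) : Int) - 1 = (i : Int) by push_cast; ring]; exact hwf))

-- ===== VERDICT (by name: the statement is the Claim_ definition above) =====
theorem get_word_at_position_py_spec : Claim_unchanged_get_word_at_position_py := by
  intro line character _hdom hpre
  unfold Spec_get_word_at_position_py
  intro hnd
  unfold Pre_get_word_at_position_py at hpre
  have hlen : (line.length : Int) = PySem.Str.len line := by simp [PySem.Str.len_eq]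
  by_cases hge : character ≥ PySem.Str.len line
  · simp only [get_word_at_position_py, get_word_at_position_py_alt, if_pos hge]
  · rw [ge_iff_le, Int.not_le] at hge
    simp only [get_word_at_position_py, get_word_at_position_py_alt,
      if_neg (by omega : ¬ character ≥ PySem.Str.len line)]
    by_cases hneg : character < 0
    · -- negative cursor outside D_: the cursor char is not a word char, both sides give none
      have hwf : pvWordAt line character = false := by
        unfold D_get_word_at_position_py at hnd
        by_cases h : pvWordAt line character = true
        · exact absurd ⟨hneg, h⟩ hnd
        · simpa using h
      have hstart : pyAeLeft line character = character := pyAeLeft_nonpos line character (by omega)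
      have hend : pyAeRight line character = character := by
        rw [pyAeRight, dif_neg (by simp [hwf])]
      rw [hstart, hend, if_neg (lt_irrefl character),
          pyAltScan_none line line.length character line.length 0 (by push_cast; omega)]
    · -- ordinary cursor 0 ≤ character < len(line)
      rw [Int.not_lt] at hneg
      obtain ⟨c, rfl⟩ : ∃ c : Nat, character = (c : Int) := ⟨character.toNat, by omega⟩
      have hcn : c < line.length := by omega
      rw [pyAeLeft_natCast line c, pyAeRight_natCast line line.length hlen c,
          pyAltScan_main line c hcn line.length 0 (by omega) (by omega) (Or.inl rfl)]
      by_cases h : pvSpecL line c < pyAltRun line line.length c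
      · rw [if_pos h, if_pos (by push_cast; omega)]
      · rw [if_neg h, if_neg (by push_cast; omega)]

theorem get_word_at_position_py_changed : Claim_changed_get_word_at_position_py := by
  unfold Claim_changed_get_word_at_position_py
  refine ⟨by decide, by decide, by decide, ?_, ?_, by decide⟩
  · show get_word_at_position_py "ab" (-1) = some "b"
    have h1 : pyAeLeft "ab" (-1) = -1 := by
      rw [pyAeLeft, dif_neg (by decide)]
    have h2 : pyAeRight "ab" (-1) = 2 := by
      rw [pyAeRight, dif_pos (by constructor <;> decide)]
      rw [pyAeRight, dif_pos (by constructor <;> decide)]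
      norm_num
      rw [pyAeRight, dif_pos (by constructor <;> decide)]
      norm_num
      rw [pyAeRight, dif_neg (by decide)]
    simp only [get_word_at_position_py, h1, h2]
    norm_num
    decide
  · show get_word_at_position_py_alt "ab" (-1) = none
    rw [get_word_at_position_py_alt, if_neg (by decide)]
    exact pyAltScan_none "ab" 2 (-1) 2 0 (by decide)

theorem get_word_at_position_py_tight : Claim_exact_get_word_at_position_py := by
  intro line character _hdom hpre hd
  unfold D_get_word_at_position_py at hd
  unfold Pre_get_word_at_position_py at hpre
  obtain ⟨hneg, hw⟩ := hd
  have hlen : (line.length : Int) = PySem.Str.len line := by simp [PySem.Str.len_eq]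
  -- B returns none
  have hB : get_word_at_position_py_alt line character = none := by
    rw [get_word_at_position_py_alt, if_neg (by omega)]
    exact pyAltScan_none line line.length character line.length 0 (by push_cast; omega)
  -- A returns some: the expansion to the right makes at least one step
  have hstart : pyAeLeft line character = character := pyAeLeft_nonpos line character (by omega)
  have hstep : pyAeRight line character = pyAeRight line (character + 1) := by
    rw [pyAeRight, dif_pos ⟨by omega, hw⟩]
  have hge := pyAeRight_ge line (character + 1)
  rw [hB]
  simp only [get_word_at_position_py, if_neg (by omega : ¬ character ≥ PySem.Str.len line),
    hstart, hstep]
  rw [if_pos (by omega)]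
  exact Option.some_ne_none _
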